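-- pv_equiv track=rewrite | github.com/Outsider1010/shape_analogy | src/utils/utils.py | find_unique_bool
-- ===== SOURCE A (Python) =====
-- def find_unique_bool(bool_list: tuple[bool, ...]):
--     count_true = count_false = elem_true = elem_false = 0
--     for i in range(len(bool_list)):
--         if bool_list[i]:
--             count_true += 1
--             elem_true = i
--         else:
--             count_false += 1
--             elem_false = i
--     if count_true == 1:
--         return elem_true
--     if count_false == 1:
--         return elem_false
--     return None
-- ===== SOURCE B (Python) =====
-- def find_unique_bool(bool_list: tuple[bool, ...]):
--     for val in (True, False):
--         if val in bool_list:
--             i = bool_list.index(val)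
--             if val not in bool_list[i + 1:]:
--                 return i
--     return None
-- ===== Notes on version B (the rewrite author's own statement) =====
-- stated objective: alternative
-- what changed: A counts both values and tracks last indices in one combined indexed loop; B does no counting at all: for each value it finds the first occurrence with .index and declares it unique iff the value does not reappear in the suffix after it, returning that position.
import Mathlib
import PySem

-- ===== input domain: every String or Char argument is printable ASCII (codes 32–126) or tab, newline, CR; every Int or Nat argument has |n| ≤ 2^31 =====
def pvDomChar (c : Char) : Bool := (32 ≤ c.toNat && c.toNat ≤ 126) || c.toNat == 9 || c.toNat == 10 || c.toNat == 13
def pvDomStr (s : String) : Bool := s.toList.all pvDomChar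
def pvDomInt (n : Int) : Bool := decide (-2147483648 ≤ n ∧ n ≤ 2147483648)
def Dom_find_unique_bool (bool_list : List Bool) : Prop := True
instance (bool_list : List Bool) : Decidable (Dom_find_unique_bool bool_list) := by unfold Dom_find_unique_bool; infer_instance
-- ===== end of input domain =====

-- B replaces A's combined count-and-track-last-index loop by a count-free search: for each value,
-- find the first occurrence and return it iff the value does not reappear in the remaining suffix
-- (objective: alternative algorithm, same asymptotic cost).

-- ===== PORT A =====
-- one loop over range(len(bool_list)), state (count_true, count_false, elem_true, elem_false)
def find_unique_bool (bool_list : List Bool) : Option Int :=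
  let st : Int × Int × Int × Int :=
    (PySem.List.pyRange 0 (PySem.List.len bool_list) 1).foldl
      (fun s i =>
        if PySem.List.pyGetD bool_list i false then (s.1 + 1, s.2.1, i, s.2.2.2)
        else (s.1, s.2.1 + 1, s.2.2.1, i))
      (0, 0, 0, 0)
  if st.1 = 1 then some st.2.2.1
  else if st.2.1 = 1 then some st.2.2.2
  else none

-- ===== PORT B =====
-- for val in (True, False): if val in list: i = list.index(val); if val not in list[i+1:]: return i
def pvAltLoop (xs : List Bool) : List Bool → Option Int
  | [] => none
  | v :: vs =>
    if v ∈ xs then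
      match PySem.List.index? xs v with
      | some i =>
          if v ∈ PySem.List.slice xs (some ((i : Int) + 1)) none then pvAltLoop xs vs
          else some (i : Int)
      | none => pvAltLoop xs vs   -- unreachable: guarded by v ∈ xs
    else pvAltLoop xs vs

def find_unique_bool_alt (bool_list : List Bool) : Option Int :=
  pvAltLoop bool_list [true, false]

-- ===== PRECONDITION & SPEC =====
def Spec_find_unique_bool (bool_list : List Bool) (out : Option Int) : Prop := out = find_unique_bool_alt bool_list
instance (bool_list : List Bool) (out : Option Int) : Decidable (Spec_find_unique_bool bool_list out) := by unfold Spec_find_unique_bool; infer_instance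

-- ===== CLAIM (what is proved, stated in full; the proofs are below) =====
def Claim_equal_find_unique_bool : Prop := ∀ (bool_list : List Bool), Dom_find_unique_bool bool_list → Spec_find_unique_bool bool_list (find_unique_bool bool_list)

-- ===== LEMMAS AND PROOFS =====

-- last index (from enumeration starting at s) of value b, default d
def pvLastPos (xs : List Bool) (b : Bool) (s d : Int) : Int :=
  (PySem.List.enumerate xs s).foldl (fun a p => if p.2 = b then p.1 else a) d

theorem pvLastPos_not_mem (xs : List Bool) (b : Bool) (s d : Int) (h : b ∉ xs) :
    pvLastPos xs b s d = d := by
  induction xs generalizing s with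
  | nil => rfl
  | cons x t ih =>
    simp only [List.mem_cons, not_or] at h
    simp only [pvLastPos, PySem.List.enumerate_cons, List.foldl_cons] at *
    rcases h with ⟨hx, ht⟩
    rw [if_neg (fun e => hx e.symm)]
    exact ih _ ht

theorem pvLastPos_count_one (xs : List Bool) (b : Bool) (s d : Int)
    (h : xs.count b = 1) :
    ∃ k, PySem.List.index? xs b = some k ∧ pvLastPos xs b s d = s + k := by
  induction xs generalizing s d with
  | nil => simp at h
  | cons x t ih =>
    by_cases hx : x = b
    · subst hx
      rw [List.count_cons_self] at h
      have ht : x ∉ t := by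
        have : t.count x = 0 := by omega
        simpa [List.count_eq_zero] using this
      refine ⟨0, ?_, ?_⟩
      · simpa using PySem.List.index?_cons_self x t
      · simp only [pvLastPos, PySem.List.enumerate_cons, List.foldl_cons]
        have := pvLastPos_not_mem t x (s + 1) s ht
        simpa [pvLastPos] using this.trans (by omega)
    · have h' : t.count b = 1 := by
        rwa [List.count_cons_of_ne hx] at h
      obtain ⟨k, hk, hl⟩ := ih (s := s + 1) (d := d) h'
      refine ⟨k + 1, ?_, ?_⟩
      · rw [PySem.List.index?_cons_of_ne _ hx, hk]; rfl
      · simp only [pvLastPos, PySem.List.enumerate_cons, List.foldl_cons,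
          if_neg (by simpa using hx)]
        have : pvLastPos t b (s + 1) d = (s + 1) + k := hl
        simp only [pvLastPos] at this
        rw [this]; push_cast; ring

-- characterization of A's fold over the enumeration
theorem pvFoldA (xs : List Bool) (s : Int) (st : Int × Int × Int × Int) :
    (PySem.List.enumerate xs s).foldl
        (fun (a : Int × Int × Int × Int) p =>
          if p.2 then (a.1 + 1, a.2.1, p.1, a.2.2.2)
          else (a.1, a.2.1 + 1, a.2.2.1, p.1)) st
      = (st.1 + xs.count true, st.2.1 + xs.count false,
         pvLastPos xs true s st.2.2.1, pvLastPos xs false s st.2.2.2) := by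
  induction xs generalizing s st with
  | nil => simp [pvLastPos, PySem.List.enumerate_nil]
  | cons x t ih =>
    cases x with
    | true =>
      simp only [PySem.List.enumerate_cons, List.foldl_cons]
      rw [ih]
      simp [pvLastPos, PySem.List.enumerate_cons]
      omega
    | false =>
      simp only [PySem.List.enumerate_cons, List.foldl_cons]
      rw [if_neg (by simp)]
      rw [ih]
      simp [pvLastPos, PySem.List.enumerate_cons]
      omega

-- for index? xs v = some k : count v = 1  ↔  v does not reappear after position k
theorem pvIndexDecomp (xs : List Bool) (v : Bool) (k : Nat)
    (hk : PySem.List.index? xs v = some k) :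
    xs.drop (k + 1) = (xs.drop (k + 1)) ∧
    (xs.count v = 1 ↔ v ∉ xs.drop (k + 1)) := by
  refine ⟨rfl, ?_⟩
  rw [PySem.List.index?_eq_some_iff] at hk
  obtain ⟨pre, suf, hxs, hlen, hpre⟩ := hk
  subst hxs
  have hdrop : (pre ++ v :: suf).drop (k + 1) = suf := by
    rw [← hlen]
    simp
  rw [hdrop]
  have hpc : pre.count v = 0 := by simpa [List.count_eq_zero] using hpre
  constructor
  · intro h1
    have : suf.count v = 0 := by
      simp [List.count_append, hpc] at h1; omega
    simpa [List.count_eq_zero] using this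
  · intro hns
    have : suf.count v = 0 := by simpa [List.count_eq_zero] using hns
    simp [List.count_append, hpc, this]

theorem pvAltLoop_count_one (xs vs : List Bool) (v : Bool) (h : xs.count v = 1) :
    pvAltLoop xs (v :: vs) = (PySem.List.index? xs v).map (fun k => (k : Int)) := by
  have hmem : v ∈ xs := by
    rw [← List.count_pos_iff]; omega
  obtain ⟨k, hk⟩ : ∃ k, PySem.List.index? xs v = some k := by
    rw [PySem.List.index?_eq_idxOf?]
    exact Option.isSome_iff_exists.mp (List.isSome_idxOf?.mpr hmem)
  have hiff := (pvIndexDecomp xs v k hk).2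
  have hns : v ∉ xs.drop (k + 1) := hiff.mp h
  have hslice : PySem.List.slice xs (some ((k : Int) + 1)) none = xs.drop (k + 1) := by
    have : ((k : Int) + 1) = ((k + 1 : Nat) : Int) := by push_cast; ring
    rw [this, PySem.List.slice_from_natCast]
  simp only [pvAltLoop, if_pos hmem, hk, hslice, if_neg hns]
  rfl

theorem pvAltLoop_count_ne (xs vs : List Bool) (v : Bool) (h : xs.count v ≠ 1) :
    pvAltLoop xs (v :: vs) = pvAltLoop xs vs := by
  by_cases hmem : v ∈ xs
  · obtain ⟨k, hk⟩ : ∃ k, PySem.List.index? xs v = some k := by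
      rw [PySem.List.index?_eq_idxOf?]
      exact Option.isSome_iff_exists.mp (List.isSome_idxOf?.mpr hmem)
    have hiff := (pvIndexDecomp xs v k hk).2
    have hin : v ∈ xs.drop (k + 1) := by
      by_contra hns
      exact h (hiff.mpr hns)
    have hslice : PySem.List.slice xs (some ((k : Int) + 1)) none = xs.drop (k + 1) := by
      have : ((k : Int) + 1) = ((k + 1 : Nat) : Int) := by push_cast; ring
      rw [this, PySem.List.slice_from_natCast]
    simp only [pvAltLoop, if_pos hmem, hk, hslice, if_pos hin]
  · simp only [pvAltLoop, if_neg hmem]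

-- ===== VERDICT (by name: the statement is the Claim_ definition above) =====
theorem find_unique_bool_spec : Claim_equal_find_unique_bool := by
  intro xs _
  unfold Spec_find_unique_bool find_unique_bool find_unique_bool_alt
  have hfold :
      (PySem.List.pyRange 0 (PySem.List.len xs) 1).foldl
        (fun (s : Int × Int × Int × Int) i =>
          if PySem.List.pyGetD xs i false then (s.1 + 1, s.2.1, i, s.2.2.2)
          else (s.1, s.2.1 + 1, s.2.2.1, i)) (0, 0, 0, 0)
      = (PySem.List.enumerate xs 0).foldl
          (fun (a : Int × Int × Int × Int) p =>
            if p.2 then (a.1 + 1, a.2.1, p.1, a.2.2.2)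
            else (a.1, a.2.1 + 1, a.2.2.1, p.1)) (0, 0, 0, 0) := by
    rw [PySem.List.enumerate_eq_map_pyRange (d := false), List.foldl_map]
  rw [hfold, pvFoldA]
  simp only [zero_add]
  by_cases h1 : xs.count true = 1
  · obtain ⟨k, hk, hl⟩ := pvLastPos_count_one xs true 0 0 h1
    rw [pvAltLoop_count_one xs [false] true h1, hk]
    have h1' : ((xs.count true : Int)) = 1 := by exact_mod_cast h1
    simp [h1', hl]
  · have h1' : ¬((xs.count true : Int) = 1) := by exact_mod_cast h1
    rw [pvAltLoop_count_ne xs [false] true h1]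
    by_cases h2 : xs.count false = 1
    · obtain ⟨k, hk, hl⟩ := pvLastPos_count_one xs false 0 0 h2
      rw [pvAltLoop_count_one xs [] false h2, hk]
      have h2' : ((xs.count false : Int)) = 1 := by exact_mod_cast h2
      simp [h1', h2', hl]
    · have h2' : ¬((xs.count false : Int) = 1) := by exact_mod_cast h2
      rw [pvAltLoop_count_ne xs [] false h2]
      simp [pvAltLoop, h1', h2']
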